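-- pv_equiv track=rewrite | github.com/lauenborg/etch-loop | src/etch/signals.py | extract_finding
-- ===== SOURCE A (Python) =====
-- _TOKEN_CLEAR = "ETCH_ALL_CLEAR"
--
-- _TOKEN_ISSUES = "ETCH_ISSUES_FOUND"
--
-- _PUNCTUATION_ONLY = set("-=*_`~><|")
--
-- def extract_finding(output: str) -> str:
--     """Extract the last meaningful line before the signal token line.
--
--     Scans line by line, stops at the first line that IS a token (exact match).
--     Returns the last non-empty, non-header line before that point.
--     """
--     if not isinstance(output, str) or not output.strip():
--         return ""
--
--     lines_before: list[str] = []
--     for line in output.splitlines():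
--         stripped = line.strip().strip("`").strip()
--         if _TOKEN_CLEAR in stripped or _TOKEN_ISSUES in stripped:
--             break
--         lines_before.append(line)
--
--     for line in reversed(lines_before):
--         stripped = line.strip().strip("`").strip()
--         if not stripped:
--             continue
--         if stripped.startswith("#"):
--             continue
--         if all(c in _PUNCTUATION_ONLY for c in stripped):
--             continue
--         return stripped
--
--     return ""
-- ===== SOURCE B (Python) =====
-- _TOKEN_CLEAR = "ETCH_ALL_CLEAR"
--
-- _TOKEN_ISSUES = "ETCH_ISSUES_FOUND"
--
-- _PUNCTUATION_ONLY = set("-=*_`~><|")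
--
-- def extract_finding(output: str) -> str:
--     """Single forward pass: remember the last meaningful stripped line seen
--     before the first token line; no buffer, no reverse scan."""
--     if not isinstance(output, str) or not output.strip():
--         return ""
--     result = ""
--     for line in output.splitlines():
--         stripped = line.strip().strip("`").strip()
--         if _TOKEN_CLEAR in stripped or _TOKEN_ISSUES in stripped:
--             break
--         if stripped and not stripped.startswith("#") and not all(c in _PUNCTUATION_ONLY for c in stripped):
--             result = stripped
--     return result
-- ===== Notes on version B (the rewrite author's own statement) =====
-- stated objective: simpler
-- what changed: Replaced A's two-phase collect-then-reverse-scan (buffer of raw lines, second stripping pass, reversed iteration with continue chain) by a single forward pass that keeps the last meaningful stripped line in one variable.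
import Mathlib
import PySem

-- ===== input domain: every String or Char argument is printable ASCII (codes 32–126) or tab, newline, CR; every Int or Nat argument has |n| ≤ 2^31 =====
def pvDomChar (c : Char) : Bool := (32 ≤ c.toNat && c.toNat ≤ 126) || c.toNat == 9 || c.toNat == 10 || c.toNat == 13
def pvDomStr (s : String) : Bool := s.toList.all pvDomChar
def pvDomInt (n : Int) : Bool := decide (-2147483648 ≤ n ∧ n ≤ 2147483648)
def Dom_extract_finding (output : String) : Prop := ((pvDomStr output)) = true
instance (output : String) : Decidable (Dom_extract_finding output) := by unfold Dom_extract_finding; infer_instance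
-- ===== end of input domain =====

-- B is a single forward pass keeping the last meaningful stripped line; same return value as A (simpler decomposition, no buffer/reverse scan).

-- shared module-level context (both Pythons use the same constants)
def pvClean (line : String) : String :=
  PySem.Str.strip (PySem.Str.stripChars (PySem.Str.strip line) "`")

def pvHasToken (s : String) : Bool :=
  PySem.Str.isIn "ETCH_ALL_CLEAR" s || PySem.Str.isIn "ETCH_ISSUES_FOUND" s

def pvPunct : List Char := "-=*_`~><|".toList

-- ===== PORT A =====
-- first loop: collect lines until a token line (break)
def pvLinesBefore : List String → List String
  | [] => []
  | l :: rest =>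
      if pvHasToken (pvClean l) then []
      else l :: pvLinesBefore rest

-- second loop: over reversed lines_before, first non-skipped stripped line (early return)
def pvScanBack : List String → String
  | [] => ""
  | l :: rest =>
      if pvClean l = "" then pvScanBack rest
      else if PySem.Str.startswith (pvClean l) "#" then pvScanBack rest
      else if (pvClean l).toList.all (fun c => pvPunct.contains c) then pvScanBack rest
      else pvClean l

def extract_finding (output : String) : String :=
  if PySem.Str.strip output = "" then ""
  else pvScanBack (pvLinesBefore (PySem.Str.splitlines output)).reverse

-- ===== PORT B =====
def pvMeaningful (s : String) : Bool :=
  !(s = "") && !(PySem.Str.startswith s "#") && !(s.toList.all (fun c => pvPunct.contains c))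

-- one forward pass with accumulator `result`, break at token
def pvFwd : List String → String → String
  | [], result => result
  | l :: rest, result =>
      if pvHasToken (pvClean l) then result
      else pvFwd rest (if pvMeaningful (pvClean l) then pvClean l else result)

def extract_finding_alt (output : String) : String :=
  if PySem.Str.strip output = "" then ""
  else pvFwd (PySem.Str.splitlines output) ""

-- ===== PRECONDITION & SPEC =====
def Spec_extract_finding (output : String) (out : String) : Prop := out = extract_finding_alt output
instance (output : String) (out : String) : Decidable (Spec_extract_finding output out) := by unfold Spec_extract_finding; infer_instance

-- ===== CLAIM (what is proved, stated in full; the proofs are below) =====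
def Claim_equal_extract_finding : Prop := ∀ (output : String), Dom_extract_finding output → Spec_extract_finding output (extract_finding output)

-- ===== LEMMAS AND PROOFS =====

lemma pvScanBack_append_singleton (xs : List String) (l : String) :
    pvScanBack (xs ++ [l]) =
      if pvScanBack xs = "" then (if pvMeaningful (pvClean l) then pvClean l else "")
      else pvScanBack xs := by
  induction xs with
  | nil =>
      simp only [List.nil_append, pvScanBack, pvMeaningful]
      generalize pvClean l = s
      split_ifs <;> simp_all
      tauto
  | cons x xs ih =>
      simp only [List.cons_append, pvScanBack, ih]
      generalize pvClean x = s
      split_ifs <;> simp_all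

lemma pvMeaningful_ne_empty {s : String} (h : pvMeaningful s = true) : s ≠ "" := by
  unfold pvMeaningful at h
  intro hc; simp [hc] at h

lemma pvFwd_eq (lines : List String) (res : String) :
    pvFwd lines res =
      (if pvScanBack (pvLinesBefore lines).reverse = "" then res
       else pvScanBack (pvLinesBefore lines).reverse) := by
  induction lines generalizing res with
  | nil => simp [pvFwd, pvLinesBefore, pvScanBack]
  | cons l rest ih =>
      simp only [pvFwd, pvLinesBefore]
      by_cases ht : pvHasToken (pvClean l) = true
      · simp [ht, pvScanBack]
      · simp only [ht, if_false, Bool.false_eq_true, List.reverse_cons,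
          pvScanBack_append_singleton, ih]
        by_cases hr : pvScanBack (pvLinesBefore rest).reverse = ""
        · by_cases hm : pvMeaningful (pvClean l) = true
          · simp [hr, hm, pvMeaningful_ne_empty hm]
          · simp [hr, hm]
        · simp [hr]

-- ===== VERDICT (by name: the statement is the Claim_ definition above) =====
theorem extract_finding_spec : Claim_equal_extract_finding := by
  intro output _
  unfold Spec_extract_finding extract_finding extract_finding_alt
  by_cases h : PySem.Str.strip output = ""
  · simp [h]
  · simp only [h, if_false, pvFwd_eq]
    by_cases hr : pvScanBack (pvLinesBefore (PySem.Str.splitlines output)).reverse = "" <;>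
      simp [hr]
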